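-- pv_equiv track=rewrite | github.com/mostofashakib/Applied-Algorithm | TrappingRainWater.py | getPartialSum
-- ===== SOURCE A (Python) =====
-- def getPartialSum(height):
--     partial_sum = 0   # keeps track of the amount of trapped rain
--     max_height_seen_so_far = float('-inf')   # keeps track of the maximum height seen so far
--
--     for i in height:   #traverses through the array
--         if i >= max_height_seen_so_far:  # if the height of the current building is greater than or equal to the maximum height seen so far then update
--             max_height_seen_so_far = i
--         else:
--             partial_sum += max_height_seen_so_far - i # else update the value of partial_sum with
--                                                       #  the difference between the maximum height and the height of the current building
--     return partial_sum   # returns the total volume of trapped water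
-- ===== SOURCE B (Python) =====
-- def getPartialSum(height):
--     # B: build the running-max table first, then sum the differences.
--     maxes = []
--     m = None
--     for h in height:
--         if m is None or h > m:
--             m = h
--         maxes.append(m)
--     return sum(m - h for m, h in zip(maxes, height))
-- ===== Notes on version B (the rewrite author's own statement) =====
-- stated objective: idiomatic
-- what changed: Replaced the single branched accumulator loop by two phases: materialize the prefix-maximum table, then sum the pointwise differences max_i - h_i.
import Mathlib
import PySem

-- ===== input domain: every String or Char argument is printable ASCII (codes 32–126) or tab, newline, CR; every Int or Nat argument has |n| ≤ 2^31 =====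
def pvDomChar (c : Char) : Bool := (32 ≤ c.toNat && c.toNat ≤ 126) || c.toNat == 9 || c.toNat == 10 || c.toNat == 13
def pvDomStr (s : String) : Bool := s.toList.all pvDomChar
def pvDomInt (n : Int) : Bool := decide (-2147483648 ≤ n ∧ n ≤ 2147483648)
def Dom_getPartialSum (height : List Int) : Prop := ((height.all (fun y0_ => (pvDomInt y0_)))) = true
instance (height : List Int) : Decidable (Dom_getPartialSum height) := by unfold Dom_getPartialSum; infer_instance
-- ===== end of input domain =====

-- B replaces the single branched accumulator loop by two phases (build the prefix-max table, then sum differences); objective: idiomatic.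


-- ===== PORT A =====
-- A's loop over `height` with state (partial_sum, max_height_seen_so_far);
-- `none` models float('-inf') (any i satisfies i ≥ -inf).
def getPartialSumGo (partialSum : Int) (maxSeen : Option Int) : List Int → Int
  | [] => partialSum
  | i :: t =>
    match maxSeen with
    | none => getPartialSumGo partialSum (some i) t
    | some m =>
      if i ≥ m then getPartialSumGo partialSum (some i) t
      else getPartialSumGo (partialSum + (m - i)) (some m) t

def getPartialSum (height : List Int) : Int := getPartialSumGo 0 none height

-- ===== PORT B =====
-- B's first pass: the running-max table (m = None initially).
def prefixMax (m : Option Int) : List Int → List Int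
  | [] => []
  | h :: t =>
    match m with
    | none => h :: prefixMax (some h) t
    | some m0 =>
      let m' := if h > m0 then h else m0
      m' :: prefixMax (some m') t

def getPartialSum_alt (height : List Int) : Int :=
  (List.zipWith (fun m h => m - h) (prefixMax none height) height).sum

-- ===== PRECONDITION & SPEC =====
def Spec_getPartialSum (height : List Int) (out : Int) : Prop := out = getPartialSum_alt height
instance (height : List Int) (out : Int) : Decidable (Spec_getPartialSum height out) := by unfold Spec_getPartialSum; infer_instance

-- ===== CLAIM (what is proved, stated in full; the proofs are below) =====
def Claim_equal_getPartialSum : Prop := ∀ (height : List Int), Dom_getPartialSum height → Spec_getPartialSum height (getPartialSum height)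

-- ===== LEMMAS AND PROOFS =====
theorem getPartialSumGo_eq (t : List Int) : ∀ (m acc : Int),
    getPartialSumGo acc (some m) t
      = acc + (List.zipWith (fun a h => a - h) (prefixMax (some m) t) t).sum := by
  induction t with
  | nil => intro m acc; simp [getPartialSumGo, prefixMax]
  | cons i t ih =>
    intro m acc
    by_cases hge : i ≥ m
    · simp only [getPartialSumGo, prefixMax, hge, if_pos]
      by_cases hgt : i > m
      · simp [hgt, ih, List.zipWith]
      · have : i = m := le_antisymm (not_lt.mp hgt) hge
        subst this
        simp [ih, List.zipWith]
    · simp only [getPartialSumGo, prefixMax, hge]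
      have hgt : ¬ i > m := by omega
      simp [hgt, ih, List.zipWith]
      ring

-- ===== VERDICT (by name: the statement is the Claim_ definition above) =====
theorem getPartialSum_spec : Claim_equal_getPartialSum := by
  intro height _
  unfold Spec_getPartialSum getPartialSum getPartialSum_alt
  cases height with
  | nil => simp [getPartialSumGo, prefixMax]
  | cons i t =>
    simp [getPartialSumGo, prefixMax, getPartialSumGo_eq]
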